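-- pv_equiv track=rewrite | github.com/meelgroup/cubeprobe | codes/flash.py | getCNF
-- ===== SOURCE A (Python) =====
-- def pushVar(variable, cnfClauses):
--     cnfLen = len(cnfClauses)
--     for i in range(cnfLen):
--         cnfClauses[i].append(variable)
--     return cnfClauses
--
-- def getCNF(variable, binStr, sign, origTotalVars):
--     cnfClauses = []
--     binLen = len(binStr)
--     if sign:
--         cnfClauses.append([-(binLen + 1 + origTotalVars)])
--     else:
--         cnfClauses.append([binLen + 1 + origTotalVars])
--     for i in range(binLen):
--         newVar = int(binLen - i + origTotalVars)
--         if sign == False: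
--             newVar = -1 * (binLen - i + origTotalVars)
--         if binStr[binLen - i - 1] == "0":
--             cnfClauses.append([int(-1 * newVar)])
--         else:
--             cnfClauses = pushVar(int(-1 * newVar), cnfClauses)
--     pushVar(variable, cnfClauses)
--     return cnfClauses
-- ===== SOURCE B (Python) =====
-- def getCNF(variable, binStr, sign, origTotalVars):
--     n = len(binStr)
--
--     def lit(i):
--         v = n - i + origTotalVars
--         return -v if sign else v
--
--     # ordered step indices of the '1' bits (A pushes lit(j) onto all earlier clauses at step j)
--     ones = [j for j in range(n) if binStr[n - 1 - j] != "0"]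
--     # each clause's (creation step, base literal): the initial clause at step -1, one clause per '0' bit
--     bases = [(-1, lit(-1))] + [(i, lit(i)) for i in range(n) if binStr[n - 1 - i] == "0"]
--     # assemble every clause independently: base, then the ones created after it, then the variable
--     return [[b] + [lit(j) for j in ones if j > t] + [variable] for t, b in bases]
-- ===== Notes on version B (the rewrite author's own statement) =====
-- stated objective: alternative
-- what changed: Instead of A's repeated pushVar passes that append each '1'-literal and the final variable onto every already-created clause, B records each clause's creation step and base literal plus the ordered list of '1'-step literals, then assembles every clause independently as base + later ones + variable.
import Mathlib
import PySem

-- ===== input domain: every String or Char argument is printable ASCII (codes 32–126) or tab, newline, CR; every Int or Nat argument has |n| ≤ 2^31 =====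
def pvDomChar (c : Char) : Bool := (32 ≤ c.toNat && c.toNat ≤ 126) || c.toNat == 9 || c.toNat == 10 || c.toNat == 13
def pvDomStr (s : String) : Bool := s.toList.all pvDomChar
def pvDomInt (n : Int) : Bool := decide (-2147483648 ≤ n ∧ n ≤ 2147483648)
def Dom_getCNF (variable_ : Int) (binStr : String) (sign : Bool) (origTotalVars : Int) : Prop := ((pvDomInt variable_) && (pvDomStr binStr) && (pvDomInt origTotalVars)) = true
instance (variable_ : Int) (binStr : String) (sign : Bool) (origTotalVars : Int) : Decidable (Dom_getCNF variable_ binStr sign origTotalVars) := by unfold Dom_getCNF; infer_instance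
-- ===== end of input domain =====

-- B replaces A's repeated pushVar-over-all-clauses passes by recording each clause's base
-- literal with its creation step and assembling every clause independently (alternative decomposition, same cost).

-- ===== PORT A =====
def pushVar (v : Int) : List (List Int) → List (List Int)
  | [] => []
  | c :: rest => (c ++ [v]) :: pushVar v rest

def getCNF (variable_ : Int) (binStr : String) (sign : Bool) (origTotalVars : Int) : List (List Int) :=
  let bin := binStr.toList
  let binLen : Int := bin.length
  let init : List (List Int) :=
    if sign then [[-(binLen + 1 + origTotalVars)]] else [[binLen + 1 + origTotalVars]]
  let cnf := (PySem.List.pyRange 0 binLen 1).foldl (fun cnf i =>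
      let newVar : Int := binLen - i + origTotalVars
      let newVar := if sign = false then -1 * (binLen - i + origTotalVars) else newVar
      if PySem.List.pyGet? bin (binLen - i - 1) = some '0' then
        cnf ++ [[-1 * newVar]]
      else
        pushVar (-1 * newVar) cnf) init
  pushVar variable_ cnf

-- ===== PORT B =====
def litB (n o : Int) (sign : Bool) (i : Int) : Int :=
  if sign then -(n - i + o) else n - i + o

def getCNF_alt (variable_ : Int) (binStr : String) (sign : Bool) (origTotalVars : Int) : List (List Int) :=
  let bin := binStr.toList
  let n : Int := bin.length
  let ones := (PySem.List.pyRange 0 n 1).filter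
      (fun j => !decide (PySem.List.pyGet? bin (n - 1 - j) = some '0'))
  let bases := (-1, litB n origTotalVars sign (-1)) ::
    ((PySem.List.pyRange 0 n 1).filter
        (fun i => decide (PySem.List.pyGet? bin (n - 1 - i) = some '0'))).map
      (fun i => (i, litB n origTotalVars sign i))
  bases.map (fun tb =>
    tb.2 :: ((ones.filter (fun j => decide (tb.1 < j))).map (litB n origTotalVars sign) ++ [variable_]))

-- ===== PRECONDITION & SPEC =====
def Spec_getCNF (variable_ : Int) (binStr : String) (sign : Bool) (origTotalVars : Int) (out : List (List Int)) : Prop := out = getCNF_alt variable_ binStr sign origTotalVars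
instance (variable_ : Int) (binStr : String) (sign : Bool) (origTotalVars : Int) (out : List (List Int)) : Decidable (Spec_getCNF variable_ binStr sign origTotalVars out) := by unfold Spec_getCNF; infer_instance

-- ===== CLAIM (what is proved, stated in full; the proofs are below) =====
def Claim_equal_getCNF : Prop := ∀ (variable_ : Int) (binStr : String) (sign : Bool) (origTotalVars : Int), Dom_getCNF variable_ binStr sign origTotalVars → Spec_getCNF variable_ binStr sign origTotalVars (getCNF variable_ binStr sign origTotalVars)

-- ===== LEMMAS AND PROOFS =====

theorem pushVar_eq_map (v : Int) (l : List (List Int)) : pushVar v l = l.map (· ++ [v]) := by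
  induction l with
  | nil => rfl
  | cons c rest ih => simp [pushVar, ih]

-- the '1'-step literals among steps < k
def onesK (bin : List Char) (n : Int) (k : Nat) : List Int :=
  (PySem.List.pyRange 0 k 1).filter (fun j => !decide (PySem.List.pyGet? bin (n - 1 - j) = some '0'))

-- (creation step, base literal) of every clause created before step k
def basesK (bin : List Char) (n o : Int) (sign : Bool) (k : Nat) : List (Int × Int) :=
  (-1, litB n o sign (-1)) ::
    ((PySem.List.pyRange 0 k 1).filter
        (fun i => decide (PySem.List.pyGet? bin (n - 1 - i) = some '0'))).map
      (fun i => (i, litB n o sign i))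

theorem mem_onesK_lt (bin : List Char) (n : Int) (k : Nat) {j : Int}
    (h : j ∈ onesK bin n k) : j < (k : Int) := by
  unfold onesK at h
  have := List.of_mem_filter h
  have hm := List.mem_of_mem_filter h
  exact (PySem.List.mem_pyRange_one.1 hm).2

theorem mem_basesK_lt (bin : List Char) (n o : Int) (sign : Bool) (k : Nat) {tb : Int × Int}
    (h : tb ∈ basesK bin n o sign k) : tb.1 < (k : Int) := by
  unfold basesK at h
  rcases List.mem_cons.1 h with rfl | h
  · omega
  · rcases List.mem_map.1 h with ⟨i, hi, rfl⟩
    have hm := List.mem_of_mem_filter hi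
    exact (PySem.List.mem_pyRange_one.1 hm).2

theorem neg_newVar_eq_lit (n o i : Int) (sign : Bool) :
    -1 * (if sign = false then -1 * (n - i + o) else n - i + o) = litB n o sign i := by
  cases sign <;> simp [litB]

theorem fold_inv (bin : List Char) (sign : Bool) (o : Int) (k : Nat)
    (hk : k ≤ bin.length) :
    (PySem.List.pyRange 0 (k : Int) 1).foldl (fun cnf i =>
        let newVar : Int := (bin.length : Int) - i + o
        let newVar := if sign = false then -1 * ((bin.length : Int) - i + o) else newVar
        if PySem.List.pyGet? bin ((bin.length : Int) - i - 1) = some '0' then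
          cnf ++ [[-1 * newVar]]
        else
          pushVar (-1 * newVar) cnf)
      [[litB (bin.length : Int) o sign (-1)]]
    = (basesK bin (bin.length : Int) o sign k).map (fun tb =>
        tb.2 :: ((onesK bin (bin.length : Int) k).filter (fun j => decide (tb.1 < j))).map
          (litB (bin.length : Int) o sign)) := by
  induction k with
  | zero =>
    simp [basesK, onesK, PySem.List.pyRange]
  | succ k ih =>
    have hk' : k ≤ bin.length := Nat.le_of_succ_le hk
    have hsplit : PySem.List.pyRange 0 ((k : Int) + 1) 1
        = PySem.List.pyRange 0 (k : Int) 1 ++ [(k : Int)] :=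
      PySem.List.pyRange_one_succ_right (by exact_mod_cast Nat.zero_le k)
    have hcast : ((k + 1 : Nat) : Int) = (k : Int) + 1 := by push_cast; ring
    rw [hcast, hsplit, List.foldl_append, ih hk']
    simp only [List.foldl_cons, List.foldl_nil]
    rw [neg_newVar_eq_lit]
    have hidx : (bin.length : Int) - (k : Int) - 1 = (bin.length : Int) - 1 - (k : Int) := by ring
    rw [hidx]
    by_cases h0 : PySem.List.pyGet? bin ((bin.length : Int) - 1 - (k : Int)) = some '0'
    · -- '0' bit: a new singleton clause is appended
      rw [if_pos h0]
      have hones : onesK bin (bin.length : Int) (k + 1) = onesK bin (bin.length : Int) k := by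
        unfold onesK
        rw [hcast, hsplit, List.filter_append]
        simp [h0]
      have hbases : basesK bin (bin.length : Int) o sign (k + 1)
          = basesK bin (bin.length : Int) o sign k ++ [((k : Int), litB (bin.length : Int) o sign (k : Int))] := by
        unfold basesK
        rw [hcast, hsplit, List.filter_append]
        simp [h0]
      rw [hones, hbases, List.map_append]
      congr 1
      have hnil : (onesK bin (bin.length : Int) k).filter (fun j => decide ((k : Int) < j)) = [] := by
        apply List.filter_eq_nil_iff.2
        intro j hj
        have := mem_onesK_lt bin (bin.length : Int) k hj
        simp; omega
      simp [hnil]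
    · -- '1' bit: the literal is pushed onto every existing clause
      rw [if_neg h0, pushVar_eq_map]
      have hones : onesK bin (bin.length : Int) (k + 1)
          = onesK bin (bin.length : Int) k ++ [(k : Int)] := by
        unfold onesK
        rw [hcast, hsplit, List.filter_append]
        simp [h0]
      have hbases : basesK bin (bin.length : Int) o sign (k + 1)
          = basesK bin (bin.length : Int) o sign k := by
        unfold basesK
        rw [hcast, hsplit, List.filter_append]
        simp [h0]
      rw [hones, hbases, List.map_map]
      apply List.map_congr_left
      intro tb htb
      have hlt := mem_basesK_lt bin (bin.length : Int) o sign k htb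
      simp only [Function.comp_apply, List.filter_append, List.map_append]
      have : List.filter (fun j => decide (tb.1 < j)) [(k : Int)] = [(k : Int)] := by
        simp; omega
      simp [this]

-- ===== VERDICT (by name: the statement is the Claim_ definition above) =====
theorem getCNF_spec : Claim_equal_getCNF := by
  intro variable_ binStr sign o _
  unfold Spec_getCNF getCNF getCNF_alt
  simp only []
  have hinit : (if sign then [[-((binStr.toList.length : Int) + 1 + o)]]
      else [[(binStr.toList.length : Int) + 1 + o]])
      = [[litB (binStr.toList.length : Int) o sign (-1)]] := by
    cases sign <;> simp [litB]
  rw [hinit]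
  have h := fold_inv binStr.toList sign o binStr.toList.length (le_refl _)
  rw [h, pushVar_eq_map, List.map_map]
  apply List.map_congr_left
  intro tb _
  simp [onesK]
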